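-- pv_equiv track=rewrite | github.com/aniketmondal1210/LeetCode-Odyssey | 3903. Smallest Stable Index I/smallest_stable_index_i.py | firstStableIndex
-- ===== SOURCE A (Python) =====
-- def firstStableIndex(nums: list[int], k: int) -> int:
--     n = len(nums)
--     for i in range(n):
--         maxi = max(nums[:i + 1])
--         mini = min(nums[i:])
--         instability = maxi - mini
--         if instability <= k:
--             return i
--     return -1
-- ===== SOURCE B (Python) =====
-- def firstStableIndex(nums: list[int], k: int) -> int:
--     n = len(nums)
--     suf = [0] * n
--     cur = None
--     for i in range(n - 1, -1, -1):
--         cur = nums[i] if cur is None else min(cur, nums[i])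
--         suf[i] = cur
--     pm = None
--     for i, x in enumerate(nums):
--         pm = x if pm is None else max(pm, x)
--         if pm - suf[i] <= k:
--             return i
--     return -1
-- ===== Notes on version B (the rewrite author's own statement) =====
-- stated objective: alternative
-- what changed: Replaces the per-index max/min over fresh slices by a precomputed suffix-min array plus a single forward scan with a running prefix max.
import Mathlib
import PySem

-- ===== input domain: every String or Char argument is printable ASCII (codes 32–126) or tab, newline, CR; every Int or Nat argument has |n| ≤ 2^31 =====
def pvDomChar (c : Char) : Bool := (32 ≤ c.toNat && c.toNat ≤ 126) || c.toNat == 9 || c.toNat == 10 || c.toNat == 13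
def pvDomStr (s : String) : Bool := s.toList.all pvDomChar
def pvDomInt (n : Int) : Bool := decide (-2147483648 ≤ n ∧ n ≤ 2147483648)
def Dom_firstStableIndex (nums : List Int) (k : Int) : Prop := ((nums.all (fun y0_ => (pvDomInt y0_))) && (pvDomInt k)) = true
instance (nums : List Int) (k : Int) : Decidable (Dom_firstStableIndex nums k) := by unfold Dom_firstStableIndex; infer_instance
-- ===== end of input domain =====

-- B precomputes a suffix-min array and scans once with a running prefix max, instead of A's per-index slice max/min.


-- ===== PORT A =====
-- the 'for i in range(n)' loop with early return: recursion over the remaining index list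
def aGo (nums : List Int) (k : Int) : List Int → Int
  | [] => -1
  | i :: rest =>
    let maxi := (PySem.List.max? (PySem.List.slice nums none (some (i + 1))) (fun y => y)).getD 0
    let mini := (PySem.List.min? (PySem.List.slice nums (some i) none) (fun y => y)).getD 0
    let instability := maxi - mini
    if instability ≤ k then i else aGo nums k rest

def firstStableIndex (nums : List Int) (k : Int) : Int :=
  aGo nums k (PySem.List.pyRange 0 (nums.length : Int) 1)

-- ===== PORT B =====
-- the backward suffix-min loop: built back-to-front, i.e. structural recursion on the list
def sufMins : List Int → List Int
  | [] => []
  | x :: xs =>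
    match sufMins xs with
    | [] => [x]
    | m :: ms => min x m :: m :: ms

-- the forward enumerate loop with running prefix max pm and early return
def bGo (k : Int) : Option Int → Int → List Int → List Int → Int
  | pm, i, x :: xs, s :: ss =>
    let pm' := match pm with | none => x | some m => max m x
    if pm' - s ≤ k then i else bGo k (some pm') (i + 1) xs ss
  | _, _, _, _ => -1

def firstStableIndex_alt (nums : List Int) (k : Int) : Int :=
  bGo k none 0 nums (sufMins nums)

-- ===== PRECONDITION & SPEC =====
def Spec_firstStableIndex (nums : List Int) (k : Int) (out : Int) : Prop := out = firstStableIndex_alt nums k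
instance (nums : List Int) (k : Int) (out : Int) : Decidable (Spec_firstStableIndex nums k out) := by unfold Spec_firstStableIndex; infer_instance

-- ===== CLAIM (what is proved, stated in full; the proofs are below) =====
def Claim_equal_firstStableIndex : Prop := ∀ (nums : List Int) (k : Int), Dom_firstStableIndex nums k → Spec_firstStableIndex nums k (firstStableIndex nums k)

-- ===== LEMMAS AND PROOFS =====

-- common reference: first index whose running prefix max minus remaining-suffix min is ≤ k
def refGo (k : Int) : Option Int → Int → List Int → Int
  | _, _, [] => -1
  | pm, i, x :: xs =>
    let pm' := match pm with | none => x | some m => max m x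
    if pm' - xs.foldl min x ≤ k then i else refGo k (some pm') (i + 1) xs

theorem foldl_min_pull (ys : List Int) : ∀ a b : Int, min a (ys.foldl min b) = ys.foldl min (min a b) := by
  induction ys with
  | nil => intro a b; rfl
  | cons y ys ih =>
    intro a b
    simp only [List.foldl_cons]
    rw [ih a (min b y), min_assoc]

theorem sufMins_cons (x : Int) (xs : List Int) : sufMins (x :: xs) = xs.foldl min x :: sufMins xs := by
  induction xs generalizing x with
  | nil => rfl
  | cons y ys ih =>
    show (match sufMins (y :: ys) with
          | [] => [x]
          | m :: ms => min x m :: m :: ms) = _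
    rw [ih y]
    simp only [List.foldl_cons]
    rw [foldl_min_pull]

theorem bGo_eq_refGo (k : Int) (l : List Int) : ∀ pm i, bGo k pm i l (sufMins l) = refGo k pm i l := by
  induction l with
  | nil => intro pm i; rfl
  | cons x xs ih =>
    intro pm i
    rw [sufMins_cons]
    show (if _ - xs.foldl min x ≤ k then i else bGo k _ (i + 1) xs (sufMins xs)) = _
    rw [ih]
    rfl

-- running prefix max of a Python list prefix
def pmOf : List Int → Option Int
  | [] => none
  | x :: xs => some (xs.foldl max x)

theorem pmOf_append (l : List Int) (x : Int) :
    pmOf (l ++ [x]) = some (match pmOf l with | none => x | some m => max m x) := by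
  cases l with
  | nil => rfl
  | cons y ys => simp [pmOf, List.foldl_append]

theorem aGo_eq (nums : List Int) (k : Int) : ∀ (d j : Nat), nums.length = j + d →
    aGo nums k (PySem.List.pyRange (j : Int) (nums.length : Int) 1)
      = refGo k (pmOf (nums.take j)) (j : Int) (nums.drop j) := by
  intro d
  induction d with
  | zero =>
    intro j hj
    rw [PySem.List.pyRange_one_eq_nil (by omega)]
    rw [List.drop_eq_nil_of_le (by omega)]
    rfl
  | succ d ih =>
    intro j hj
    have hjlt : j < nums.length := by omega
    obtain ⟨x, hx⟩ : ∃ x, nums[j]? = some x := ⟨nums[j], List.getElem?_eq_getElem hjlt⟩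
    have hdrop : nums.drop j = x :: nums.drop (j + 1) := by
      rw [List.drop_eq_getElem_cons hjlt]
      simp [List.getElem?_eq_getElem hjlt] at hx
      rw [hx]
    have htake : nums.take (j + 1) = nums.take j ++ [x] := by
      rw [List.take_add_one, hx]; rfl
    rw [PySem.List.pyRange_one_cons (by exact_mod_cast hjlt)]
    show (if ((PySem.List.max? (PySem.List.slice nums none (some ((j : Int) + 1))) (fun y => y)).getD 0)
             - ((PySem.List.min? (PySem.List.slice nums (some (j : Int)) none) (fun y => y)).getD 0) ≤ k
          then (j : Int) else aGo nums k (PySem.List.pyRange ((j : Int) + 1) (nums.length : Int) 1)) = _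
    have h1 : PySem.List.slice nums none (some ((j : Int) + 1)) = nums.take (j + 1) := by
      have : ((j : Int) + 1) = ((j + 1 : Nat) : Int) := by push_cast; ring
      rw [this, PySem.List.slice_to_natCast]
    have h2 : PySem.List.slice nums (some (j : Int)) none = nums.drop j := by
      rw [PySem.List.slice_from_natCast]
    rw [h1, h2, htake, hdrop]
    -- maxi via pmOf
    have hmax : (PySem.List.max? (nums.take j ++ [x]) (fun y => y)).getD 0
        = (match pmOf (nums.take j) with | none => x | some m => max m x) := by
      cases hcase : nums.take j with
      | nil => simp [PySem.List.max?_id_cons, pmOf]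
      | cons y ys =>
        simp only [List.cons_append, PySem.List.max?_id_cons, pmOf, Option.getD_some,
          List.foldl_append, List.foldl_cons, List.foldl_nil]
    have hmin : (PySem.List.min? (x :: nums.drop (j + 1)) (fun y => y)).getD 0
        = (nums.drop (j + 1)).foldl min x := by
      simp [PySem.List.min?_id_cons]
    rw [hmax, hmin]
    show _ = refGo k (pmOf (nums.take j)) (j : Int) (x :: nums.drop (j + 1))
    rw [refGo.eq_def]
    by_cases hc : (match pmOf (nums.take j) with | none => x | some m => max m x)
        - (nums.drop (j + 1)).foldl min x ≤ k
    · simp only [hc, if_true]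
    · simp only [hc, if_false]
      have : ((j : Int) + 1) = ((j + 1 : Nat) : Int) := by push_cast; ring
      rw [this, ih (j + 1) (by omega)]
      have hp : pmOf (nums.take (j + 1)) = some (match pmOf (nums.take j) with | none => x | some m => max m x) := by
        rw [htake]; exact pmOf_append _ _
      rw [hp]

-- ===== VERDICT (by name: the statement is the Claim_ definition above) =====
theorem firstStableIndex_spec : Claim_equal_firstStableIndex := by
  intro nums k _
  unfold Spec_firstStableIndex firstStableIndex firstStableIndex_alt
  have h0 : ((0 : Int)) = ((0 : Nat) : Int) := rfl
  rw [h0, aGo_eq nums k nums.length 0 (by omega)]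
  rw [bGo_eq_refGo]
  rfl
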